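-- pv_equiv track=rewrite | github.com/khslsahan/Food_DD | nutrition-app/scripts/extract_recipe.py | assign_tables_to_recipes
-- ===== SOURCE A (Python) =====
-- def assign_tables_to_recipes(tables, recipe_sections):
--     """Assign tables to recipes based on their content and position."""
--     # This is a simplified approach - in practice you might need more sophisticated logic
--     # For now, we'll distribute tables evenly among recipes
--
--     if not recipe_sections:
--         return {0: tables}  # All tables go to first recipe
--
--     tables_per_recipe = len(tables) // len(recipe_sections)
--     remainder = len(tables) % len(recipe_sections)
--
--     recipe_tables = {}
--     table_idx = 0
--
--     for i, section in enumerate(recipe_sections):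
--         # Calculate how many tables this recipe should get
--         num_tables = tables_per_recipe
--         if i < remainder:
--             num_tables += 1
--
--         recipe_tables[i] = tables[table_idx:table_idx + num_tables]
--         table_idx += num_tables
--
--     return recipe_tables
-- ===== SOURCE B (Python) =====
-- def assign_tables_to_recipes(tables, recipe_sections):
--     """Assign tables to recipes based on their content and position."""
--     if not recipe_sections:
--         return {0: tables}  # All tables go to first recipe
--
--     q, r = divmod(len(tables), len(recipe_sections))
--     # recipe i owns the half-open slice [start(i), start(i+1)) with
--     # start(i) = i*q + min(i, r): the first r recipes get q+1 tables, the rest q.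
--     start = lambda i: i * q + min(i, r)
--     return {i: tables[start(i):start(i + 1)] for i in range(len(recipe_sections))}
-- ===== Notes on version B (the rewrite author's own statement) =====
-- stated objective: simpler
-- what changed: Replaces the stateful running table_idx accumulator with closed-form slice boundaries start(i) = i*q + min(i, r) computed from divmod, building the dict directly over range(len(recipe_sections)).
import Mathlib
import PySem

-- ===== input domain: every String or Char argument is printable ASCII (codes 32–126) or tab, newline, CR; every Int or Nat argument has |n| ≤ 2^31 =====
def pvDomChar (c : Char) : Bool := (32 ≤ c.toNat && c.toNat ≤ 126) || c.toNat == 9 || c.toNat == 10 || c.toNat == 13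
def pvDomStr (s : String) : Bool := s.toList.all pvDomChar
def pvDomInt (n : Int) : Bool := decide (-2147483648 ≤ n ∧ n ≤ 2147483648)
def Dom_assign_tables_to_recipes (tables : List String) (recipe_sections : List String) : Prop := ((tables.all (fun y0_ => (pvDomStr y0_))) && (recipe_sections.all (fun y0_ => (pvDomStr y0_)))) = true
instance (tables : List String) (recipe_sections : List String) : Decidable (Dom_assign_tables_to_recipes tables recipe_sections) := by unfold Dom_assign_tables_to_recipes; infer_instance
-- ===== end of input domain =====

-- B replaces A's running table_idx accumulator with closed-form slice boundaries
-- start(i) = i*q + min(i, r) computed from divmod (objective: simpler).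


-- ===== PORT A =====
-- one iteration of A's for-loop: state = (recipe_tables, table_idx)
def atrStep (tables : List String) (tablesPerRecipe remainder : Int)
    (st : PySem.Dict Int (List String) × Int) (p : Int × String) :
    PySem.Dict Int (List String) × Int :=
  let numTables := tablesPerRecipe + (if p.1 < remainder then 1 else 0)
  (st.1.insert p.1 (PySem.List.slice tables (some st.2) (some (st.2 + numTables))),
   st.2 + numTables)

def assign_tables_to_recipes (tables : List String) (recipe_sections : List String) : List (Int × List String) :=
  if recipe_sections = [] then
    [((0 : Int), tables)]  -- {0: tables}
  else
    let tablesPerRecipe := PySem.Int.floordiv (tables.length : Int) (recipe_sections.length : Int)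
    let remainder := PySem.Int.mod (tables.length : Int) (recipe_sections.length : Int)
    let st := (PySem.List.enumerate recipe_sections 0).foldl
      (atrStep tables tablesPerRecipe remainder)
      (PySem.Dict.empty, (0 : Int))
    st.1.items

-- ===== PORT B =====
def assign_tables_to_recipes_alt (tables : List String) (recipe_sections : List String) : List (Int × List String) :=
  if recipe_sections = [] then
    [((0 : Int), tables)]  -- {0: tables}
  else
    let q := PySem.Int.floordiv (tables.length : Int) (recipe_sections.length : Int)
    let r := PySem.Int.mod (tables.length : Int) (recipe_sections.length : Int)
    -- start(i) = i*q + min(i, r); recipe i gets tables[start(i):start(i+1)]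
    (PySem.List.pyRange 0 (recipe_sections.length : Int) 1).map
      (fun i => (i, PySem.List.slice tables (some (i * q + min i r)) (some ((i + 1) * q + min (i + 1) r))))

-- ===== PRECONDITION & SPEC =====
def Spec_assign_tables_to_recipes (tables : List String) (recipe_sections : List String) (out : List (Int × List String)) : Prop := out = assign_tables_to_recipes_alt tables recipe_sections
instance (tables : List String) (recipe_sections : List String) (out : List (Int × List String)) : Decidable (Spec_assign_tables_to_recipes tables recipe_sections out) := by unfold Spec_assign_tables_to_recipes; infer_instance

-- ===== CLAIM (what is proved, stated in full; the proofs are below) =====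
def Claim_equal_assign_tables_to_recipes : Prop := ∀ (tables : List String) (recipe_sections : List String), Dom_assign_tables_to_recipes tables recipe_sections → Spec_assign_tables_to_recipes tables recipe_sections (assign_tables_to_recipes tables recipe_sections)

-- ===== LEMMAS AND PROOFS =====

-- A's loop from state (d, start s), over sections enumerated from s, appends exactly
-- B's closed-form slices for indices s, s+1, … — provided all of d's keys are below s.
lemma atr_fold_items (tables : List String) (q r : Int) :
    ∀ (m : List String) (s : Int) (d : PySem.Dict Int (List String)),
      (∀ k : Int, s ≤ k → d.contains k = false) →
      ∀ (idx : Int), idx = s * q + min s r →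
      ((PySem.List.enumerate m s).foldl (atrStep tables q r) (d, idx)).1.items
        = d.items ++ (PySem.List.pyRange s (s + m.length) 1).map
            (fun i => (i, PySem.List.slice tables (some (i * q + min i r)) (some ((i + 1) * q + min (i + 1) r)))) := by
  intro m
  induction m with
  | nil =>
      intro s d _ idx _
      simp [PySem.List.enumerate_nil, PySem.List.pyRange_one_eq_nil (le_refl s)]
  | cons x m ih =>
      intro s d hd idx hidx
      subst hidx
      rw [PySem.List.enumerate_cons]
      have hstep : s * q + min s r + (q + (if s < r then 1 else 0)) = (s + 1) * q + min (s + 1) r := by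
        rcases lt_or_ge s r with h | h
        · simp only [if_pos h]; have : min s r = s := min_eq_left (le_of_lt h)
          have h2 : min (s + 1) r = s + 1 := min_eq_left (by omega)
          rw [this, h2]; ring
        · simp only [if_neg (not_lt.mpr h)]
          have : min s r = r := min_eq_right h
          have h2 : min (s + 1) r = r := min_eq_right (by omega)
          rw [this, h2]; ring
      simp only [List.foldl_cons, atrStep]
      rw [hstep]
      rw [ih (s + 1) _ (by
        intro k hk
        rw [PySem.Dict.contains_insert]
        have : (k == s) = false := by simp; omega
        rw [this, hd k (by omega)]
        rfl) _ rfl]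
      rw [PySem.Dict.items_insert_of_not_contains _ _ (hd s (le_refl s))]
      have hR : PySem.List.pyRange s (s + ((x :: m).length : Int)) 1
          = s :: PySem.List.pyRange (s + 1) (s + 1 + (m.length : Int)) 1 := by
        rw [show s + ((x :: m).length : Int) = s + 1 + (m.length : Int) by push_cast [List.length_cons]; omega]
        exact PySem.List.pyRange_one_cons (by omega)
      rw [hR]
      simp

theorem assign_tables_to_recipes_spec_aux (tables recipe_sections : List String) :
    assign_tables_to_recipes tables recipe_sections = assign_tables_to_recipes_alt tables recipe_sections := by
  unfold assign_tables_to_recipes assign_tables_to_recipes_alt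
  by_cases h : recipe_sections = []
  · simp [h]
  · simp only [if_neg h]
    set q := PySem.Int.floordiv (tables.length : Int) (recipe_sections.length : Int) with hq
    set r := PySem.Int.mod (tables.length : Int) (recipe_sections.length : Int) with hr
    have hr0 : 0 ≤ r := by
      rw [hr, PySem.Int.mod_natCast]; positivity
    rw [atr_fold_items tables q r recipe_sections 0 PySem.Dict.empty
          (by intro k _; exact PySem.Dict.contains_empty k) 0
          (by rw [min_eq_left hr0]; ring)]
    rw [show ((0 : Int) + (recipe_sections.length : Int)) = (recipe_sections.length : Int) by ring]
    rfl

-- ===== VERDICT (by name: the statement is the Claim_ definition above) =====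
theorem assign_tables_to_recipes_spec : Claim_equal_assign_tables_to_recipes := by
  intro tables recipe_sections _
  exact assign_tables_to_recipes_spec_aux tables recipe_sections
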